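-- pv_equiv track=rewrite | github.com/ykirnev/ykirnev | Python/Python_lections_solutions/DivDigit.py | divdigit
-- ===== SOURCE A (Python) =====
-- def divdigit(n):
--     mas = [0] * 10
--     for i in range(1, 10):
--         if n % i == 0:
--             mas[i] = 1
--     n = str(n)
--     cnt = 0
--     for i in range(len(n)):
--         if mas[int(n[i])] == 1:
--             cnt += 1
--     return cnt
-- ===== SOURCE B (Python) =====
-- def divdigit(n):
--     cnt = 0
--     m = n
--     while m > 0:
--         m, d = divmod(m, 10)
--         if d != 0 and n % d == 0:
--             cnt += 1
--     return cnt
-- ===== Notes on version B (the rewrite author's own statement) =====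
-- stated objective: alternative
-- what changed: Replaces A's build-a-divisibility-table-then-scan-str(n) approach with pure arithmetic: a divmod while-loop extracts digits numerically, never converting n to a string and never building the table.
import Mathlib
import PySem

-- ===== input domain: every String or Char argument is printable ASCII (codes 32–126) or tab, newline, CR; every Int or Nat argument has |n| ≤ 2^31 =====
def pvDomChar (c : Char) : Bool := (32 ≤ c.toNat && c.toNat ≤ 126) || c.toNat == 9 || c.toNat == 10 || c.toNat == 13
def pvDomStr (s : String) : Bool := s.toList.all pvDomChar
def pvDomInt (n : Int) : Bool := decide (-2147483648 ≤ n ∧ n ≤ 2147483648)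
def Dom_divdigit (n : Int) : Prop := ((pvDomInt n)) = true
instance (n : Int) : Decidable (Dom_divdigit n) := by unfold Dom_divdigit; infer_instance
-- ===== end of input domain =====

-- B extracts the digits of n arithmetically with a divmod while-loop instead of A's
-- table-building loop followed by a scan over str(n); objective: alternative (same cost).

-- ===== PORT A =====
def divdigit (n : Int) : Int :=
  let mas : List Int := List.replicate 10 0
  let mas := (PySem.List.pyRange 1 10 1).foldl
      (fun mas i => if PySem.Int.mod n i = 0 then PySem.List.pySetD mas i 1 else mas) mas
  let s := (PySem.Int.toStr n).toList   -- n = str(n), indexed as its code points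
  (PySem.List.pyRange 0 (s.length : Int) 1).foldl
      (fun cnt i =>
        if PySem.List.pyGetD mas ((PySem.Int.ofChars? [PySem.List.pyGetD s i ' ']).getD 0) 0 = 1
        then cnt + 1 else cnt) 0

-- ===== PORT B =====
-- termination helper for the while-loop: m strictly shrinks under floor division by 10
lemma pvFloordiv10_lt (m : Int) (h : ¬ m ≤ 0) :
    (PySem.Int.floordiv m 10).toNat < m.toNat := by
  have : PySem.Int.floordiv m 10 = m / 10 := by
    simp [PySem.Int.floordiv, Int.fdiv_eq_ediv]
  rw [this]; omega

-- the while-loop of Source B: while m > 0: m, d = divmod(m, 10); if d != 0 and n % d == 0: cnt += 1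
def divdigitAltLoop (n m cnt : Int) : Int :=
  if h : m ≤ 0 then cnt
  else
    let d := PySem.Int.mod m 10
    let m' := PySem.Int.floordiv m 10
    divdigitAltLoop n m' (if d ≠ 0 ∧ PySem.Int.mod n d = 0 then cnt + 1 else cnt)
termination_by m.toNat
decreasing_by exact pvFloordiv10_lt m h

def divdigit_alt (n : Int) : Int := divdigitAltLoop n n 0

-- ===== PRECONDITION & SPEC =====
-- Pre_ excludes negative n: there str(n) starts with '-' and int('-') raises ValueError in A.
def Pre_divdigit (n : Int) : Prop := 0 ≤ n
instance (n : Int) : Decidable (Pre_divdigit n) := by unfold Pre_divdigit; infer_instance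
def pvWitness_divdigit : Int := 24

def Spec_divdigit (n : Int) (out : Int) : Prop := out = divdigit_alt n
instance (n : Int) (out : Int) : Decidable (Spec_divdigit n out) := by unfold Spec_divdigit; infer_instance

-- ===== CLAIM (what is proved, stated in full; the proofs are below) =====
def Claim_equal_divdigit : Prop := ∀ (n : Int), Dom_divdigit n → Pre_divdigit n → Spec_divdigit n (divdigit n)

-- ===== LEMMAS AND PROOFS =====

-- the digits of a natural number, least significant first
def pvDigits (m : Nat) : List Nat :=
  if h : m = 0 then [] else (m % 10) :: pvDigits (m / 10)
decreasing_by exact Nat.div_lt_self (Nat.pos_of_ne_zero h) (by norm_num)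

-- the per-digit predicate both programs count
def pvHit (n : Int) (d : Nat) : Bool := decide (¬ (d : Int) = 0 ∧ PySem.Int.mod n d = 0)

-- the table A builds, written out entrywise
def masSpec (n : Int) : List Int := [0, if PySem.Int.mod n 1 = 0 then 1 else 0, if PySem.Int.mod n 2 = 0 then 1 else 0, if PySem.Int.mod n 3 = 0 then 1 else 0, if PySem.Int.mod n 4 = 0 then 1 else 0, if PySem.Int.mod n 5 = 0 then 1 else 0, if PySem.Int.mod n 6 = 0 then 1 else 0, if PySem.Int.mod n 7 = 0 then 1 else 0, if PySem.Int.mod n 8 = 0 then 1 else 0, if PySem.Int.mod n 9 = 0 then 1 else 0]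

-- A's per-character test, as a Boolean predicate
def pvHitChar (n : Int) (ch : Char) : Bool :=
  decide (PySem.List.pyGetD (masSpec n) ((PySem.Int.ofChars? [ch]).getD 0) 0 = 1)

lemma foldl_cons_congr {α β : Type} (f : β → α → β) (a : α) (l : List α) {b c : β} (h : f b a = c) :
    List.foldl f b (a :: l) = List.foldl f c l := by rw [List.foldl_cons, h]

set_option maxHeartbeats 1000000 in
lemma mas_eq (n : Int) :
    (PySem.List.pyRange 1 10 1).foldl
      (fun mas i => if PySem.Int.mod n i = 0 then PySem.List.pySetD mas i 1 else mas)
      (List.replicate 10 0) = masSpec n := by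
  rw [show PySem.List.pyRange 1 10 1 = [1,2,3,4,5,6,7,8,9] from by decide]
  calc List.foldl (fun mas i => if PySem.Int.mod n i = 0 then PySem.List.pySetD mas i 1 else mas) (List.replicate 10 (0:Int)) [1,2,3,4,5,6,7,8,9]
      = List.foldl (fun mas i => if PySem.Int.mod n i = 0 then PySem.List.pySetD mas i 1 else mas) ([0, if PySem.Int.mod n 1 = 0 then 1 else 0, 0, 0, 0, 0, 0, 0, 0, 0] : List Int) [2,3,4,5,6,7,8,9] := foldl_cons_congr _ _ _ (by split_ifs <;> rfl)
    _ = List.foldl (fun mas i => if PySem.Int.mod n i = 0 then PySem.List.pySetD mas i 1 else mas) ([0, if PySem.Int.mod n 1 = 0 then 1 else 0, if PySem.Int.mod n 2 = 0 then 1 else 0, 0, 0, 0, 0, 0, 0, 0] : List Int) [3,4,5,6,7,8,9] := foldl_cons_congr _ _ _ (by split_ifs <;> rfl)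
    _ = List.foldl (fun mas i => if PySem.Int.mod n i = 0 then PySem.List.pySetD mas i 1 else mas) ([0, if PySem.Int.mod n 1 = 0 then 1 else 0, if PySem.Int.mod n 2 = 0 then 1 else 0, if PySem.Int.mod n 3 = 0 then 1 else 0, 0, 0, 0, 0, 0, 0] : List Int) [4,5,6,7,8,9] := foldl_cons_congr _ _ _ (by split_ifs <;> rfl)
    _ = List.foldl (fun mas i => if PySem.Int.mod n i = 0 then PySem.List.pySetD mas i 1 else mas) ([0, if PySem.Int.mod n 1 = 0 then 1 else 0, if PySem.Int.mod n 2 = 0 then 1 else 0, if PySem.Int.mod n 3 = 0 then 1 else 0, if PySem.Int.mod n 4 = 0 then 1 else 0, 0, 0, 0, 0, 0] : List Int) [5,6,7,8,9] := foldl_cons_congr _ _ _ (by split_ifs <;> rfl)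
    _ = List.foldl (fun mas i => if PySem.Int.mod n i = 0 then PySem.List.pySetD mas i 1 else mas) ([0, if PySem.Int.mod n 1 = 0 then 1 else 0, if PySem.Int.mod n 2 = 0 then 1 else 0, if PySem.Int.mod n 3 = 0 then 1 else 0, if PySem.Int.mod n 4 = 0 then 1 else 0, if PySem.Int.mod n 5 = 0 then 1 else 0, 0, 0, 0, 0] : List Int) [6,7,8,9] := foldl_cons_congr _ _ _ (by split_ifs <;> rfl)
    _ = List.foldl (fun mas i => if PySem.Int.mod n i = 0 then PySem.List.pySetD mas i 1 else mas) ([0, if PySem.Int.mod n 1 = 0 then 1 else 0, if PySem.Int.mod n 2 = 0 then 1 else 0, if PySem.Int.mod n 3 = 0 then 1 else 0, if PySem.Int.mod n 4 = 0 then 1 else 0, if PySem.Int.mod n 5 = 0 then 1 else 0, if PySem.Int.mod n 6 = 0 then 1 else 0, 0, 0, 0] : List Int) [7,8,9] := foldl_cons_congr _ _ _ (by split_ifs <;> rfl)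
    _ = List.foldl (fun mas i => if PySem.Int.mod n i = 0 then PySem.List.pySetD mas i 1 else mas) ([0, if PySem.Int.mod n 1 = 0 then 1 else 0, if PySem.Int.mod n 2 = 0 then 1 else 0, if PySem.Int.mod n 3 = 0 then 1 else 0, if PySem.Int.mod n 4 = 0 then 1 else 0, if PySem.Int.mod n 5 = 0 then 1 else 0, if PySem.Int.mod n 6 = 0 then 1 else 0, if PySem.Int.mod n 7 = 0 then 1 else 0, 0, 0] : List Int) [8,9] := foldl_cons_congr _ _ _ (by split_ifs <;> rfl)
    _ = List.foldl (fun mas i => if PySem.Int.mod n i = 0 then PySem.List.pySetD mas i 1 else mas) ([0, if PySem.Int.mod n 1 = 0 then 1 else 0, if PySem.Int.mod n 2 = 0 then 1 else 0, if PySem.Int.mod n 3 = 0 then 1 else 0, if PySem.Int.mod n 4 = 0 then 1 else 0, if PySem.Int.mod n 5 = 0 then 1 else 0, if PySem.Int.mod n 6 = 0 then 1 else 0, if PySem.Int.mod n 7 = 0 then 1 else 0, if PySem.Int.mod n 8 = 0 then 1 else 0, 0] : List Int) [9] := foldl_cons_congr _ _ _ (by split_ifs <;> rfl)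
    _ = List.foldl (fun mas i => if PySem.Int.mod n i = 0 then PySem.List.pySetD mas i 1 else mas) ([0, if PySem.Int.mod n 1 = 0 then 1 else 0, if PySem.Int.mod n 2 = 0 then 1 else 0, if PySem.Int.mod n 3 = 0 then 1 else 0, if PySem.Int.mod n 4 = 0 then 1 else 0, if PySem.Int.mod n 5 = 0 then 1 else 0, if PySem.Int.mod n 6 = 0 then 1 else 0, if PySem.Int.mod n 7 = 0 then 1 else 0, if PySem.Int.mod n 8 = 0 then 1 else 0, if PySem.Int.mod n 9 = 0 then 1 else 0] : List Int) [] := foldl_cons_congr _ _ _ (by split_ifs <;> rfl)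
    _ = masSpec n := List.foldl_nil

-- A's test on the digit character of d < 10 agrees with pvHit n d
set_option maxHeartbeats 1000000 in
lemma hitChar_eq (n : Int) (d : Nat) (hdlt : d < 10) :
    pvHitChar n (Nat.digitChar d) = pvHit n d := by
  interval_cases d
  · simp only [pvHitChar, show ((PySem.Int.ofChars? [Nat.digitChar 0]).getD 0) = 0 from by decide]
    by_cases h : PySem.Int.mod n 0 = 0 <;> simp [masSpec, PySem.List.pyGetD, pvHit, h]
  · simp only [pvHitChar, show ((PySem.Int.ofChars? [Nat.digitChar 1]).getD 0) = 1 from by decide]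
    by_cases h : PySem.Int.mod n 1 = 0 <;> simp [masSpec, PySem.List.pyGetD, pvHit, h]
  · simp only [pvHitChar, show ((PySem.Int.ofChars? [Nat.digitChar 2]).getD 0) = 2 from by decide]
    by_cases h : PySem.Int.mod n 2 = 0 <;> simp [masSpec, PySem.List.pyGetD, pvHit, h]
  · simp only [pvHitChar, show ((PySem.Int.ofChars? [Nat.digitChar 3]).getD 0) = 3 from by decide]
    by_cases h : PySem.Int.mod n 3 = 0 <;> simp [masSpec, PySem.List.pyGetD, pvHit, h]
  · simp only [pvHitChar, show ((PySem.Int.ofChars? [Nat.digitChar 4]).getD 0) = 4 from by decide]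
    by_cases h : PySem.Int.mod n 4 = 0 <;> simp [masSpec, PySem.List.pyGetD, pvHit, h]
  · simp only [pvHitChar, show ((PySem.Int.ofChars? [Nat.digitChar 5]).getD 0) = 5 from by decide]
    by_cases h : PySem.Int.mod n 5 = 0 <;> simp [masSpec, PySem.List.pyGetD, pvHit, h]
  · simp only [pvHitChar, show ((PySem.Int.ofChars? [Nat.digitChar 6]).getD 0) = 6 from by decide]
    by_cases h : PySem.Int.mod n 6 = 0 <;> simp [masSpec, PySem.List.pyGetD, pvHit, h]
  · simp only [pvHitChar, show ((PySem.Int.ofChars? [Nat.digitChar 7]).getD 0) = 7 from by decide]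
    by_cases h : PySem.Int.mod n 7 = 0 <;> simp [masSpec, PySem.List.pyGetD, pvHit, h]
  · simp only [pvHitChar, show ((PySem.Int.ofChars? [Nat.digitChar 8]).getD 0) = 8 from by decide]
    by_cases h : PySem.Int.mod n 8 = 0 <;> simp [masSpec, PySem.List.pyGetD, pvHit, h]
  · simp only [pvHitChar, show ((PySem.Int.ofChars? [Nat.digitChar 9]).getD 0) = 9 from by decide]
    by_cases h : PySem.Int.mod n 9 = 0 <;> simp [masSpec, PySem.List.pyGetD, pvHit, h]

lemma pvDigits_pos (m : Nat) (hm : 0 < m) : pvDigits m = m % 10 :: pvDigits (m / 10) := by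
  rw [pvDigits, dif_neg (by omega)]

-- str(m) for m > 0 is the reversed digit list rendered as characters
lemma toDigitsCore_eq (fuel m : Nat) (acc : List Char) (hf : m < fuel) (hm : 0 < m) :
    Nat.toDigitsCore 10 fuel m acc = ((pvDigits m).map Nat.digitChar).reverse ++ acc := by
  induction m using Nat.strong_induction_on generalizing fuel acc with
  | _ m ih =>
    cases fuel with
    | zero => omega
    | succ f =>
      rw [Nat.toDigitsCore]
      by_cases hz : m / 10 = 0
      · rw [if_pos hz, pvDigits_pos m hm, hz, pvDigits]
        rfl
      · rw [if_neg hz,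
          ih (m / 10) (Nat.div_lt_self hm (by norm_num)) f _ (by omega) (Nat.pos_of_ne_zero hz)]
        conv_rhs => rw [pvDigits_pos m hm]
        simp

lemma toDigits_eq (m : Nat) (hm : 0 < m) :
    Nat.toDigits 10 m = ((pvDigits m).map Nat.digitChar).reverse := by
  rw [Nat.toDigits, toDigitsCore_eq (m + 1) m [] (by omega) hm, List.append_nil]

-- B's while-loop counts pvHit over the digits of m
lemma altLoop_eq (n m cnt : Int) :
    divdigitAltLoop n m cnt = cnt + ((pvDigits m.toNat).countP (pvHit n) : Int) := by
  induction m, cnt using divdigitAltLoop.induct (n := n) with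
  | case1 m cnt h =>
    rw [divdigitAltLoop, dif_pos h, pvDigits, dif_pos (by omega)]
    simp
  | case2 m cnt h d m' ih =>
    rw [divdigitAltLoop, dif_neg h]
    have hm : 0 < m := by omega
    have hmod : PySem.Int.mod m 10 = ((m.toNat % 10 : Nat) : Int) := by
      simp only [PySem.Int.mod, Int.fmod_eq_emod]
      omega
    have hdiv : (PySem.Int.floordiv m 10).toNat = m.toNat / 10 := by
      have : PySem.Int.floordiv m 10 = m / 10 := by
        simp [PySem.Int.floordiv, Int.fdiv_eq_ediv]
      rw [this]; omega
    simp only [dite_eq_ite] at ih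
    show divdigitAltLoop n m' (if d ≠ 0 ∧ PySem.Int.mod n d = 0 then cnt + 1 else cnt)
        = cnt + ((pvDigits m.toNat).countP (pvHit n) : Int)
    rw [ih]
    show (if d ≠ 0 ∧ PySem.Int.mod n d = 0 then cnt + 1 else cnt)
        + ((pvDigits (PySem.Int.floordiv m 10).toNat).countP (pvHit n) : Int)
        = cnt + ((pvDigits m.toNat).countP (pvHit n) : Int)
    rw [hdiv, pvDigits_pos m.toNat (by omega), List.countP_cons]
    have hcond : (¬ PySem.Int.mod m 10 = 0 ∧ PySem.Int.mod n (PySem.Int.mod m 10) = 0)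
        ↔ pvHit n (m.toNat % 10) = true := by
      rw [hmod, pvHit]
      simp
    show (if PySem.Int.mod m 10 ≠ 0 ∧ PySem.Int.mod n (PySem.Int.mod m 10) = 0 then cnt + 1 else cnt)
        + (((pvDigits (m.toNat / 10)).countP (pvHit n) : Nat) : Int)
        = cnt + (((pvDigits (m.toNat / 10)).countP (pvHit n) + if pvHit n (m.toNat % 10) then 1 else 0 : Nat) : Int)
    by_cases hc : pvHit n (m.toNat % 10) = true
    · rw [if_pos (hcond.mpr hc), hc]
      simp only [if_true]
      push_cast
      ring
    · rw [if_neg (fun hx => hc (hcond.mp ⟨hx.1, hx.2⟩)), if_neg hc]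
      simp

-- digits are < 10
lemma pvDigits_lt (m : Nat) : ∀ d ∈ pvDigits m, d < 10 := by
  induction m using Nat.strong_induction_on with
  | _ m ih =>
    rw [pvDigits]
    by_cases h : m = 0
    · simp [h]
    · rw [dif_neg h]
      intro d hd
      rcases List.mem_cons.mp hd with rfl | hd
      · exact Nat.mod_lt _ (by norm_num)
      · exact ih (m / 10) (Nat.div_lt_self (Nat.pos_of_ne_zero h) (by norm_num)) d hd

-- countP over the Boolean predicate, with the accumulator shifted out
lemma foldl_countP {α : Type} (p : α → Bool) (l : List α) (cnt : Int) :
    l.foldl (fun c x => if p x then c + 1 else c) cnt = cnt + (l.countP p : Int) := by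
  induction l generalizing cnt with
  | nil => simp
  | cons x xs ih =>
    simp only [List.foldl_cons, List.countP_cons, ih]
    by_cases h : p x = true <;> simp [h] <;> push_cast <;> ring

-- str(n) for n > 0 is the reversed digit list
lemma toList_toStr_pos (n : Int) (hn : 0 < n) :
    (PySem.Int.toStr n).toList = ((pvDigits n.toNat).map Nat.digitChar).reverse := by
  rw [PySem.Int.toList_toStr, PySem.Int.toChars, if_neg (by omega),
    toDigits_eq n.toNat (by omega)]

-- ===== VERDICT (by name: the statement is the Claim_ definition above) =====
theorem divdigit_spec : Claim_equal_divdigit := by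
  intro n _ hn
  unfold Spec_divdigit
  by_cases h0 : n = 0
  · subst h0
    have hB : divdigit_alt 0 = 0 := by rw [divdigit_alt, divdigitAltLoop]; simp
    have hA : divdigit 0 = 0 := by decide
    rw [hA, hB]
  · have hpos : 0 < n := lt_of_le_of_ne hn (Ne.symm h0)
    simp only [divdigit, divdigit_alt]
    rw [mas_eq]
    rw [PySem.List.foldl_pyRange_zero_pyGetD' (PySem.Int.toStr n).toList ' '
      (fun cnt c =>
        if PySem.List.pyGetD (masSpec n) ((PySem.Int.ofChars? [c]).getD 0) 0 = 1
        then cnt + 1 else cnt) 0]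
    have hbody : (fun (cnt : Int) c =>
        if PySem.List.pyGetD (masSpec n) ((PySem.Int.ofChars? [c]).getD 0) 0 = 1
        then cnt + 1 else cnt) = (fun (cnt : Int) c => if pvHitChar n c then cnt + 1 else cnt) := by
      funext cnt c
      simp [pvHitChar]
    rw [hbody, foldl_countP, toList_toStr_pos n hpos, altLoop_eq, List.countP_reverse,
      List.countP_map]
    have : List.countP (pvHitChar n ∘ Nat.digitChar) (pvDigits n.toNat)
        = List.countP (pvHit n) (pvDigits n.toNat) :=
      List.countP_congr (fun d hd => by
        simp only [Function.comp_apply, hitChar_eq n d (pvDigits_lt n.toNat d hd)])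
    rw [this]
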